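-- pv_equiv track=rewrite | github.com/sthpravin/ScreenCapturePOS | ecr_demo.py | h_lrc
-- ===== SOURCE A (Python) =====
-- def h_lrc(s):
--     lrc = 0
--     #remove STX
--     if s[:4] == "[02]":
--         s = s[4:]
--     #calculate LRC
--     for i in range(len(s)):
--         j = s[:2]
--         if not j:
--             break
--         if j[:1] == '[' and s[3:4] == ']':
--             temp_i = int(s[1:3],16)
--             lrc ^= temp_i
--             s = s[4:]
--         else:
--             lrc ^= ord(s[:1])
--             s = s[1:]
--     return chr(lrc)
-- ===== SOURCE B (Python) =====
-- def h_lrc(s):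
--     # tokenize-then-reduce: build the explicit token list, then fold XOR over it
--     if s.startswith("[02]"):
--         s = s[4:]
--     i, n, toks = 0, len(s), []
--     while i < n:
--         if s[i] == '[' and i + 3 < n and s[i + 3] == ']':
--             toks.append(s[i:i + 4])
--             i += 4
--         else:
--             toks.append(s[i])
--             i += 1
--     lrc = 0
--     for t in toks:
--         lrc ^= int(t[1:3], 16) if len(t) == 4 else ord(t)
--     return chr(lrc)
-- ===== Notes on version B (the rewrite author's own statement) =====
-- stated objective: faster
-- what changed: A's destructive scan-and-advance loop that repeatedly reslices the string (quadratic copying) is replaced by a two-phase tokenize-then-reduce: an index-based pass builds the explicit token list ('[xy]' escapes or single chars), then a separate fold XORs the value of each token.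
import Mathlib
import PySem

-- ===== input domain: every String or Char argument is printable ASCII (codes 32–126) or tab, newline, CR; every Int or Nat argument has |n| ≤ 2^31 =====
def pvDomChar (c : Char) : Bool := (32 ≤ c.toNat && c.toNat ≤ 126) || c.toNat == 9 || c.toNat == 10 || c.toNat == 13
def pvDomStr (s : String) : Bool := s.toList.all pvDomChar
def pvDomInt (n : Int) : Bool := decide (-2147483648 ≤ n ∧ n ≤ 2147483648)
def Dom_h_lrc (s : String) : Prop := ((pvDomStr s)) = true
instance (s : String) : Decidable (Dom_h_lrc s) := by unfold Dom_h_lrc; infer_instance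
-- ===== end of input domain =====

-- B replaces A's destructive scan-and-advance loop by an explicit tokenize pass followed by a
-- separate XOR fold over the token list (idiomatic two-phase decomposition, same values).

-- ===== PORT A =====
-- strip STX: s = s[4:] if s[:4] == "[02]"  (shared by both Pythons as their first step)
def h_lrc_strip (l : List Char) : List Char :=
  if l.take 4 = ['[', '0', '2', ']'] then l.drop 4 else l

-- A's loop 'for i in range(len(s))' consumes ≥ 1 char per iteration and breaks on empty s,
-- so its iteration count is ported as fuel = len(s).
def h_lrc_go : Nat → Int → List Char → Int
  | 0, lrc, _ => lrc
  | _ + 1, lrc, [] => lrc          -- j = s[:2] empty → break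
  | n + 1, lrc, c :: rest =>
    if c = '[' ∧ rest[2]? = some ']' then   -- j[:1] == '[' and s[3:4] == ']'
      match rest with
      | b :: c2 :: _ :: rest' =>
        match PySem.Int.ofCharsBase? [b, c2] 16 with   -- int(s[1:3], 16)
        | some v => h_lrc_go n (PySem.Int.bxor lrc v) rest'   -- lrc ^= temp_i; s = s[4:]
        | none => lrc              -- Python raises ValueError here; outside Pre_h_lrc
      | _ => lrc                   -- unreachable: the guard needs at least 4 chars
    else h_lrc_go n (PySem.Int.bxor lrc (c.toNat : Int)) rest   -- lrc ^= ord(s[:1]); s = s[1:]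

def h_lrc (s : String) : String :=
  let l := h_lrc_strip s.toList
  let lrc := h_lrc_go l.length 0 l
  String.ofList [Char.ofNat lrc.toNat]   -- chr(lrc); lrc < 0 (where chr raises) is outside Pre_h_lrc

-- ===== PORT B =====
-- pass 1 of Source B: build the explicit token list ('[xy]' escapes of length 4, else single chars)
def h_lrc_tokenize : List Char → List (List Char)
  | [] => []
  | c :: rest =>
    if c = '[' ∧ rest[2]? = some ']' then
      ((c :: rest).take 4) :: h_lrc_tokenize (rest.drop 3)
    else [c] :: h_lrc_tokenize rest
termination_by l => l.length
decreasing_by all_goals (simp; try omega)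

-- value of one token: int(t[1:3], 16) if len(t) == 4 else ord(t)
def h_lrc_tokVal (t : List Char) : Int :=
  match t with
  | [_, b, c, _] => (PySem.Int.ofCharsBase? [b, c] 16).getD 0   -- int raises on none; outside Pre_h_lrc
  | c :: _ => (c.toNat : Int)
  | [] => 0   -- unreachable: tokens are never empty

def h_lrc_alt (s : String) : String :=
  let l := h_lrc_strip s.toList   -- s.startswith("[02]") strip
  let lrc := (h_lrc_tokenize l).foldl (fun lrc t => PySem.Int.bxor lrc (h_lrc_tokVal t)) 0
  String.ofList [Char.ofNat lrc.toNat]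

-- ===== PRECONDITION & SPEC =====
-- position p of l starts a '[xy]' escape whose interior is NOT a base-16 int literal
-- (there Python's int raises ValueError)
def h_lrc_badAt (l : List Char) (p : Nat) : Bool :=
  match l[p]?, l[p+1]?, l[p+2]?, l[p+3]? with
  | some c, some b, some c2, some d =>
      c == '[' && d == ']' && (PySem.Int.ofCharsBase? [b, c2] 16).isNone
  | _, _, _, _ => false

-- position p of l starts an escape whose interior parses to a negative base-16 value
def h_lrc_negAt (l : List Char) (p : Nat) : Bool :=
  match l[p]?, l[p+1]?, l[p+2]?, l[p+3]? with
  | some c, some b, some c2, some d =>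
      c == '[' && d == ']' &&
        (match PySem.Int.ofCharsBase? [b, c2] 16 with
         | some v => decide (v < 0)
         | none => false)
  | _, _, _, _ => false

-- Pre_ excludes exactly the inputs where Python A raises: a position of the STX-stripped string
-- starting an escape whose two interior characters are no base-16 int literal (int raises
-- ValueError), or an odd number of positions starting negative-valued escapes (a minus-signed
-- interior), which leave the final checksum negative so chr raises ValueError.
def Pre_h_lrc (s : String) : Prop :=
  (∀ p < (h_lrc_strip s.toList).length, h_lrc_badAt (h_lrc_strip s.toList) p = false) ∧
  ((List.range (h_lrc_strip s.toList).length).countP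
      (fun p => h_lrc_negAt (h_lrc_strip s.toList) p)) % 2 = 0
instance (s : String) : Decidable (Pre_h_lrc s) := by unfold Pre_h_lrc; infer_instance

def pvWitness_h_lrc : String := "[02]a[0A]b"

def Spec_h_lrc (s : String) (out : String) : Prop := out = h_lrc_alt s
instance (s : String) (out : String) : Decidable (Spec_h_lrc s out) := by unfold Spec_h_lrc; infer_instance

-- ===== CLAIM (what is proved, stated in full; the proofs are below) =====
def Claim_equal_h_lrc : Prop := ∀ (s : String), Dom_h_lrc s → Pre_h_lrc s → Spec_h_lrc s (h_lrc s)

-- ===== LEMMAS AND PROOFS =====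

lemma h_lrc_badAt_cons (x : Char) (l : List Char) (p : Nat) :
    h_lrc_badAt (x :: l) (p + 1) = h_lrc_badAt l p := by
  simp [h_lrc_badAt]

lemma h_lrc_badAt_of_le (l : List Char) (p : Nat) (h : l.length ≤ p) :
    h_lrc_badAt l p = false := by
  simp [h_lrc_badAt, List.getElem?_eq_none h]

-- A's fueled scan equals B's fold over the token list whenever every escape token parses
-- (fuel ≥ length suffices: each iteration consumes at least one character).
lemma h_lrc_go_eq_fold :
    ∀ (fuel : Nat) (l : List Char) (lrc : Int), l.length ≤ fuel →
      (∀ p, h_lrc_badAt l p = false) →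
      h_lrc_go fuel lrc l
        = (h_lrc_tokenize l).foldl (fun a t => PySem.Int.bxor a (h_lrc_tokVal t)) lrc := by
  intro fuel
  induction fuel with
  | zero =>
    intro l lrc hlen _
    have : l = [] := List.eq_nil_of_length_eq_zero (Nat.le_zero.mp hlen)
    subst this
    simp [h_lrc_go, h_lrc_tokenize]
  | succ n ih =>
    intro l lrc hlen hv
    match l with
    | [] => simp [h_lrc_go, h_lrc_tokenize]
    | c :: rest =>
      by_cases hg : c = '[' ∧ rest[2]? = some ']'
      · -- escape branch: rest has at least 3 characters, the fourth char is ']'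
        obtain ⟨rfl, hd⟩ := hg
        match rest with
        | [] | [_] | [_, _] => simp at hd
        | b :: c2 :: d :: rest' =>
          simp only [List.getElem?_cons_succ, List.getElem?_cons_zero, Option.some.injEq] at hd
          subst hd
          have h0 := hv 0
          cases hp : PySem.Int.ofCharsBase? [b, c2] 16 with
          | none => simp [h_lrc_badAt, hp] at h0
          | some v =>
            have hv' : ∀ p, h_lrc_badAt rest' p = false := by
              intro p
              have := hv (p + 1 + 1 + 1 + 1)
              simpa [h_lrc_badAt_cons] using this
            have := ih rest' (PySem.Int.bxor lrc v) (by simp at hlen ⊢; omega) hv'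
            simp [h_lrc_go, h_lrc_tokenize, h_lrc_tokVal, hp, this]
      · -- literal branch: both sides consume one character and XOR its code
        have hv' : ∀ p, h_lrc_badAt rest p = false := by
          intro p
          have := hv (p + 1)
          simpa [h_lrc_badAt_cons] using this
        have := ih rest (PySem.Int.bxor lrc (c.toNat : Int)) (by simp at hlen ⊢; omega) hv'
        simp [h_lrc_go, h_lrc_tokenize, h_lrc_tokVal, hg, this]

-- ===== VERDICT (by name: the statement is the Claim_ definition above) =====
theorem h_lrc_spec : Claim_equal_h_lrc := by
  intro s _ hpre
  obtain ⟨hv, -⟩ := hpre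
  show h_lrc s = h_lrc_alt s
  simp only [h_lrc, h_lrc_alt]
  rw [h_lrc_go_eq_fold _ _ 0 le_rfl ?_]
  intro p
  by_cases hp : p < (h_lrc_strip s.toList).length
  · exact hv p hp
  · exact h_lrc_badAt_of_le _ _ (by omega)
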